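-- pv_equiv track=rewrite | github.com/camfung/Abalone-Comp-3981 | test/player/state_space_test/dist/app/ui/board.py | clicked_marbles
-- ===== SOURCE A (Python) =====
-- def clicked_marbles(first_ball, second_ball):
--     row1, col1 = first_ball
--     row2, col2 = second_ball
--
--     returned_array = []
--
--     # Check if positions are in the same row
--     if row1 == row2:
--         new_ball = [(row1, col)
--                     for col in range(min(col1, col2) + 1, max(col1, col2))]
--         if len(new_ball) > 0:
--             returned_array.append(new_ball[0])
--         returned_array.append((row2, col2))
--         returned_array.append((row1, col1))
--         return returned_array
--
--     # Check if positions are in the same column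
--     if col1 == col2:
--         new_ball = [(row, col1)
--                     for row in range(min(row1, row2) + 1, max(row1, row2))]
--         if len(new_ball) > 0:
--             returned_array.append(new_ball[0])
--         returned_array.append((row2, col2))
--         returned_array.append((row1, col1))
--         return returned_array
--
--     # Check if positions are in the same diagonal
--     if abs(row1 - row2) == abs(col1 - col2):
--         # Determine the direction of the diagonal
--         row_step = 1 if row1 < row2 else -1
--         col_step = 1 if col1 < col2 else -1
--
--         # Collect locations in the diagonal
--         new_ball = [(row, col) for row, col in zip(range(row1 + row_step, row2, row_step),
--                                                    range(col1 + col_step, col2, col_step))]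
--         if len(new_ball) > 0:
--             returned_array.append(new_ball[0])
--         returned_array.append((row2, col2))
--         returned_array.append((row1, col1))
--         return returned_array
--
--     # No straight line found
--     return []
-- ===== SOURCE B (Python) =====
-- def clicked_marbles(first_ball, second_ball):
--     r1, c1 = first_ball
--     r2, c2 = second_ball
--     dr, dc = r2 - r1, c2 - c1
--
--     # Aligned means horizontal, vertical, or exactly diagonal.
--     if not (dr == 0 or dc == 0 or abs(dr) == abs(dc)):
--         return []
--
--     # The single first in-between cell of the original enumeration:
--     # rows/columns enumerate from the smaller coordinate, the diagonal
--     # enumerates from the first ball towards the second.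
--     if dr == 0:
--         mid = (r1, min(c1, c2) + 1)
--     elif dc == 0:
--         mid = (min(r1, r2) + 1, c1)
--     else:
--         mid = (r1 + (1 if dr > 0 else -1), c1 + (1 if dc > 0 else -1))
--
--     out = [(r2, c2), (r1, c1)]
--     # An in-between cell exists exactly when the balls are more than one step apart.
--     return ([mid] + out) if (abs(dr) > 1 or abs(dc) > 1) else out
-- ===== Notes on version B (the rewrite author's own statement) =====
-- stated objective: simpler
-- what changed: Instead of three parallel branches each building the full list of in-between cells via range/zip comprehensions and taking its head, B computes the deltas once, tests alignment with a single negated guard, derives the single first in-between cell by closed-form arithmetic, and prepends it to the two endpoints under one unified gap>1 test; no loops or intermediate lists remain.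
import Mathlib
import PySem

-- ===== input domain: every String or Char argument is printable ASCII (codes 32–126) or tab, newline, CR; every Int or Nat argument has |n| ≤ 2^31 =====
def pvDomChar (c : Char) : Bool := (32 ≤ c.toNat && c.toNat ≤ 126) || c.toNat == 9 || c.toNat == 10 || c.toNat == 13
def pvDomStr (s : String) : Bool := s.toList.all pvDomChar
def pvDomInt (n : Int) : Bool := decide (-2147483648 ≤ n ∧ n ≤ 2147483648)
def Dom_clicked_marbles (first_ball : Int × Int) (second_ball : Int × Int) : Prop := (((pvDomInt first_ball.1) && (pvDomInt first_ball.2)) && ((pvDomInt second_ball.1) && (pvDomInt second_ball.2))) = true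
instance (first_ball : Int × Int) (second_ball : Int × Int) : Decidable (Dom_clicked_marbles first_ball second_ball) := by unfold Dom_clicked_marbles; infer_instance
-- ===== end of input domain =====

-- B computes the deltas once and derives the single first in-between cell by closed-form
-- arithmetic under one unified alignment/gap test (objective: simpler, no intermediate lists).

-- ===== PORT A =====
def clicked_marbles (first_ball : Int × Int) (second_ball : Int × Int) : List (Int × Int) :=
  let r1 := first_ball.1
  let c1 := first_ball.2
  let r2 := second_ball.1
  let c2 := second_ball.2
  if r1 = r2 then
    let new_ball := (PySem.List.pyRange (min c1 c2 + 1) (max c1 c2) 1).map (fun c => (r1, c))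
    (if 0 < new_ball.length then [new_ball.headI] else []) ++ [(r2, c2), (r1, c1)]
  else if c1 = c2 then
    let new_ball := (PySem.List.pyRange (min r1 r2 + 1) (max r1 r2) 1).map (fun r => (r, c1))
    (if 0 < new_ball.length then [new_ball.headI] else []) ++ [(r2, c2), (r1, c1)]
  else if (r1 - r2).natAbs = (c1 - c2).natAbs then
    let row_step : Int := if r1 < r2 then 1 else -1
    let col_step : Int := if c1 < c2 then 1 else -1
    let new_ball := ((PySem.List.pyRange (r1 + row_step) r2 row_step).zip
                      (PySem.List.pyRange (c1 + col_step) c2 col_step)).map (fun p => (p.1, p.2))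
    (if 0 < new_ball.length then [new_ball.headI] else []) ++ [(r2, c2), (r1, c1)]
  else []

-- ===== PORT B =====
def clicked_marbles_alt (first_ball : Int × Int) (second_ball : Int × Int) : List (Int × Int) :=
  let dr := second_ball.1 - first_ball.1
  let dc := second_ball.2 - first_ball.2
  if ¬(dr = 0 ∨ dc = 0 ∨ dr.natAbs = dc.natAbs) then []
  else
    let mid :=
      if dr = 0 then (first_ball.1, min first_ball.2 second_ball.2 + 1)
      else if dc = 0 then (min first_ball.1 second_ball.1 + 1, first_ball.2)
      else (first_ball.1 + (if 0 < dr then 1 else -1),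
            first_ball.2 + (if 0 < dc then 1 else -1))
    let out := [(second_ball.1, second_ball.2), (first_ball.1, first_ball.2)]
    if 1 < dr.natAbs ∨ 1 < dc.natAbs then mid :: out else out

-- ===== PRECONDITION & SPEC =====
def Spec_clicked_marbles (first_ball : Int × Int) (second_ball : Int × Int) (out : List (Int × Int)) : Prop := out = clicked_marbles_alt first_ball second_ball
instance (first_ball : Int × Int) (second_ball : Int × Int) (out : List (Int × Int)) : Decidable (Spec_clicked_marbles first_ball second_ball out) := by unfold Spec_clicked_marbles; infer_instance

-- ===== CLAIM (what is proved, stated in full; the proofs are below) =====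
def Claim_equal_clicked_marbles : Prop := ∀ (first_ball : Int × Int) (second_ball : Int × Int), Dom_clicked_marbles first_ball second_ball → Spec_clicked_marbles first_ball second_ball (clicked_marbles first_ball second_ball)

-- ===== LEMMAS AND PROOFS =====

-- ===== VERDICT (by name: the statement is the Claim_ definition above) =====
theorem clicked_marbles_spec : Claim_equal_clicked_marbles := by
  rintro ⟨r1, c1⟩ ⟨r2, c2⟩ _
  show clicked_marbles (r1, c1) (r2, c2) = clicked_marbles_alt (r1, c1) (r2, c2)
  by_cases hr : r1 = r2
  · subst hr
    simp only [clicked_marbles, clicked_marbles_alt, sub_self]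
    by_cases hg : min c1 c2 + 1 < max c1 c2
    · rw [PySem.List.pyRange_one_cons hg]
      simp [show 1 < (c2 - c1).natAbs from by omega]
    · rw [PySem.List.pyRange_one_eq_nil (by omega)]
      simp <;> omega
  · by_cases hc : c1 = c2
    · subst hc
      simp only [clicked_marbles, clicked_marbles_alt, sub_self, if_neg hr]
      have hdr : r2 - r1 ≠ 0 := by omega
      by_cases hg : min r1 r2 + 1 < max r1 r2
      · rw [PySem.List.pyRange_one_cons hg]
        simp [hdr, show 1 < (r2 - r1).natAbs from by omega]
      · rw [PySem.List.pyRange_one_eq_nil (by omega)]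
        simp [hdr] <;> omega
    · by_cases hd : (r1 - r2).natAbs = (c1 - c2).natAbs
      · have hdr : r2 - r1 ≠ 0 := by omega
        have hdc : c2 - c1 ≠ 0 := by omega
        have hd' : (r2 - r1).natAbs = (c2 - c1).natAbs := by omega
        simp only [clicked_marbles, clicked_marbles_alt, if_neg hr, if_neg hc, if_pos hd]
        by_cases hrlt : r1 < r2 <;> by_cases hclt : c1 < c2 <;>
          simp only [hrlt, hclt, ite_true, ite_false] <;>
          by_cases hgap : 1 < (r1 - r2).natAbs
        · rw [PySem.List.pyRange_one_cons (show r1 + 1 < r2 by omega),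
              PySem.List.pyRange_one_cons (show c1 + 1 < c2 by omega)]
          simp [hdr, hdc, hd', hrlt, hclt, show 1 < (r2 - r1).natAbs from by omega] <;> omega
        · rw [PySem.List.pyRange_one_eq_nil (show r2 ≤ r1 + 1 by omega)]
          simp [hdr, hdc, hd', show ¬(1 < (r2 - r1).natAbs ∨ 1 < (c2 - c1).natAbs) from by omega] <;> omega
        · rw [PySem.List.pyRange_one_cons (show r1 + 1 < r2 by omega),
              PySem.List.pyRange_neg_one_cons (show c2 < c1 + -1 by omega)]
          simp [hdr, hdc, hd', hrlt, hclt, show 1 < (r2 - r1).natAbs from by omega] <;> omega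
        · rw [PySem.List.pyRange_one_eq_nil (show r2 ≤ r1 + 1 by omega)]
          simp [hdr, hdc, hd', show ¬(1 < (r2 - r1).natAbs ∨ 1 < (c2 - c1).natAbs) from by omega] <;> omega
        · rw [PySem.List.pyRange_neg_one_cons (show r2 < r1 + -1 by omega),
              PySem.List.pyRange_one_cons (show c1 + 1 < c2 by omega)]
          simp [hdr, hdc, hd', hrlt, hclt, show 1 < (r2 - r1).natAbs from by omega,
                show ¬(0:Int) < r2 - r1 from by omega] <;> omega
        · rw [PySem.List.pyRange_neg_one_eq_nil (show r1 + -1 ≤ r2 by omega)]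
          simp [hdr, hdc, hd', show ¬(1 < (r2 - r1).natAbs ∨ 1 < (c2 - c1).natAbs) from by omega] <;> omega
        · rw [PySem.List.pyRange_neg_one_cons (show r2 < r1 + -1 by omega),
              PySem.List.pyRange_neg_one_cons (show c2 < c1 + -1 by omega)]
          simp [hdr, hdc, hd', hrlt, hclt, show 1 < (r2 - r1).natAbs from by omega,
                show ¬(0:Int) < r2 - r1 from by omega, show ¬(0:Int) < c2 - c1 from by omega] <;> omega
        · rw [PySem.List.pyRange_neg_one_eq_nil (show r1 + -1 ≤ r2 by omega)]
          simp [hdr, hdc, hd', show ¬(1 < (r2 - r1).natAbs ∨ 1 < (c2 - c1).natAbs) from by omega] <;> omega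
      · have : ¬(r2 - r1 = 0 ∨ c2 - c1 = 0 ∨ (r2 - r1).natAbs = (c2 - c1).natAbs) := by
          omega
        simp [clicked_marbles, clicked_marbles_alt, hr, hc, hd, this]
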